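-- pv_equiv track=rewrite | github.com/HighWarlordKabocha/aFFineBot | src/wordlists/test/old/overlapChecker.py | process_verb_chunk
-- ===== SOURCE A (Python) =====
-- from itertools import combinations
--
-- def check_letter_overlap_preprocessed(phrase_letters, pokemon1_letters, pokemon2_letters):
--     """Checks if a phrase shares letters with both Pokemon names using preprocessed data."""
--     return bool(phrase_letters.intersection(pokemon1_letters) and phrase_letters.intersection(pokemon2_letters))
--
-- def process_verb_chunk(verb_chunk, colors, animals, pokemon_letters):
--     """Worker function to process a chunk of verbs."""
--     overlapping_combinations = []  # Initialize an empty list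
--     pokemon_names = list(pokemon_letters.keys())
--     pokemon_pairs = list(combinations(pokemon_names, 2))
--
--     for verb in verb_chunk:
--         for color in colors:
--             for animal in animals:
--                 phrase = f"{verb} {color} {animal}"
--                 phrase_letters = set(phrase)
--                 for pokemon1, pokemon2 in pokemon_pairs:
--                     pokemon1_letters = pokemon_letters[pokemon1]
--                     pokemon2_letters = pokemon_letters[pokemon2]
--                     if check_letter_overlap_preprocessed(phrase_letters, pokemon1_letters, pokemon2_letters):
--                         overlapping_combinations.append((phrase, pokemon1, pokemon2))
--                         break
--     return overlapping_combinations
-- ===== SOURCE B (Python) =====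
-- from itertools import islice
--
-- def process_verb_chunk(verb_chunk, colors, animals, pokemon_letters):
--     """Worker: build all phrases, then per phrase take the first two overlapping Pokemon."""
--     names = list(pokemon_letters)
--     phrases = [f"{v} {c} {a}" for v in verb_chunk for c in colors for a in animals]
--     results = []
--     for phrase in phrases:
--         pl = set(phrase)
--         hits = list(islice((n for n in names if pl & pokemon_letters[n]), 2))
--         if len(hits) == 2:
--             results.append((phrase, hits[0], hits[1]))
--     return results
-- ===== Notes on version B (the rewrite author's own statement) =====
-- stated objective: alternative
-- what changed: B drops A's O(P^2) list of pokemon pairs entirely: it first materialises the flat list of phrases, then per phrase takes the first two overlapping pokemon names from a single lazy filtering pass over the pokemon list (the first matching pair in combinations order is exactly the first two overlapping pokemon).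
import Mathlib
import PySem

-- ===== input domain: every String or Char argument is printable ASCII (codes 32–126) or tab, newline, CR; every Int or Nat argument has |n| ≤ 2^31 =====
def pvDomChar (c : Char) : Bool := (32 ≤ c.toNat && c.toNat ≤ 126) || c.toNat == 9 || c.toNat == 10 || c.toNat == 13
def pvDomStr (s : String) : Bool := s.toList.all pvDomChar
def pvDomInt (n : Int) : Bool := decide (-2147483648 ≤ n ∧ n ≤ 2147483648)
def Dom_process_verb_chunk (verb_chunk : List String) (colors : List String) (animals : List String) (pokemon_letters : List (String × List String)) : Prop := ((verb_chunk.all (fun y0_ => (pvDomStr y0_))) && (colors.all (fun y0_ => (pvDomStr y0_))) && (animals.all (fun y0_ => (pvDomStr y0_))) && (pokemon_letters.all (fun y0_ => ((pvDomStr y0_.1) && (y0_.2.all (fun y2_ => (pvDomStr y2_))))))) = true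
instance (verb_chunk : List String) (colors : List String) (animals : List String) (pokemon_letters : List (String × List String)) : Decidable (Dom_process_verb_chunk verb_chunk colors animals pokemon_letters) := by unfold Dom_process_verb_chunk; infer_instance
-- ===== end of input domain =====

-- B drops A's pair list: it enumerates the phrases flatly and takes the first two overlapping pokemon per phrase from one filtering pass (alternative decomposition; return value proved equal).


-- ===== PORT A =====
-- set-intersection nonemptiness check ("phrase_letters.intersection(s)" truthiness)
def pvOverlap (phraseLetters s : List String) : Bool :=
  !(PySem.Set.inter phraseLetters s).isEmpty

def check_letter_overlap_preprocessed (phraseLetters p1 p2 : List String) : Bool :=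
  pvOverlap phraseLetters p1 && pvOverlap phraseLetters p2

-- itertools.combinations(xs, 2), in itertools order
def pvCombinations2 : List String → List (String × String)
  | [] => []
  | x :: xs => xs.map (fun y => (x, y)) ++ pvCombinations2 xs

def process_verb_chunk (verb_chunk : List String) (colors : List String) (animals : List String) (pokemon_letters : List (String × List String)) : List (String × String × String) :=
  let d := PySem.Dict.ofList pokemon_letters
  let pairs := pvCombinations2 d.keys
  verb_chunk.foldl (fun acc verb =>
    colors.foldl (fun acc color =>
      animals.foldl (fun acc animal =>
        let phrase := PySem.Str.join " " [verb, color, animal]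
        let phraseLetters := PySem.Set.ofList (phrase.toList.map (fun c => String.singleton c))
        -- "for pokemon1, pokemon2 in pokemon_pairs: … append; break" = first matching pair
        match pairs.find? (fun pr =>
            check_letter_overlap_preprocessed phraseLetters (d.getD pr.1 []) (d.getD pr.2 [])) with
        | some (p1, p2) => acc ++ [(phrase, p1, p2)]
        | none => acc) acc) acc) []

-- ===== PORT B =====
def process_verb_chunk_alt (verb_chunk : List String) (colors : List String) (animals : List String) (pokemon_letters : List (String × List String)) : List (String × String × String) :=
  let d := PySem.Dict.ofList pokemon_letters
  let names := d.keys
  -- the flat phrase comprehension, then one filtering pass over the pokemon list per phrase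
  let phrases := verb_chunk.flatMap (fun v =>
    colors.flatMap (fun c =>
      animals.map (fun a => PySem.Str.join " " [v, c, a])))
  phrases.filterMap (fun phrase =>
    let pl := PySem.Set.ofList (phrase.toList.map (fun c => String.singleton c))
    match (names.filter (fun n => !(PySem.Set.inter pl (d.getD n [])).isEmpty)).take 2 with
    | [p1, p2] => some (phrase, p1, p2)
    | _ => none)

-- ===== PRECONDITION & SPEC =====
def Spec_process_verb_chunk (verb_chunk : List String) (colors : List String) (animals : List String) (pokemon_letters : List (String × List String)) (out : List (String × String × String)) : Prop := out = process_verb_chunk_alt verb_chunk colors animals pokemon_letters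
instance (verb_chunk : List String) (colors : List String) (animals : List String) (pokemon_letters : List (String × List String)) (out : List (String × String × String)) : Decidable (Spec_process_verb_chunk verb_chunk colors animals pokemon_letters out) := by unfold Spec_process_verb_chunk; infer_instance

-- ===== CLAIM (what is proved, stated in full; the proofs are below) =====
def Claim_equal_process_verb_chunk : Prop := ∀ (verb_chunk : List String) (colors : List String) (animals : List String) (pokemon_letters : List (String × List String)), Dom_process_verb_chunk verb_chunk colors animals pokemon_letters → Spec_process_verb_chunk verb_chunk colors animals pokemon_letters (process_verb_chunk verb_chunk colors animals pokemon_letters)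

-- ===== LEMMAS AND PROOFS =====

-- a pair produced by pvCombinations2 has its second component in the list
theorem pvCombinations2_snd_mem {pr : String × String} : ∀ {xs : List String}, pr ∈ pvCombinations2 xs → pr.2 ∈ xs := by
  intro xs
  induction xs with
  | nil => simp [pvCombinations2]
  | cons x xs ih =>
    intro h
    simp only [pvCombinations2, List.mem_append, List.mem_map] at h
    rcases h with ⟨y, hy, hEq⟩ | h
    · subst hEq; exact List.mem_cons_of_mem _ hy
    · exact List.mem_cons_of_mem _ (ih h)

-- find? over the pairs (x, y) for y in xs
theorem find?_map_pair (P : String → Bool) (x : String) (xs : List String) :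
    (xs.map (fun y => (x, y))).find? (fun pr => P pr.1 && P pr.2)
      = if P x then (xs.find? P).map (fun y => (x, y)) else none := by
  induction xs with
  | nil => simp
  | cons z zs ih =>
    simp only [List.map_cons, List.find?_cons]
    by_cases hx : P x <;> by_cases hz : P z <;>
      simp [hx, hz, ih]

-- find? is the head of the filtered list
theorem find?_eq_head?_filter' (P : String → Bool) : ∀ (xs : List String),
    xs.find? P = (xs.filter P).head? := by
  intro xs
  induction xs with
  | nil => simp
  | cons x xs ih =>
    cases hx : P x
    · have hx' : ¬ P x = true := by simp [hx]
      rw [List.find?_cons_of_neg hx', List.filter_cons_of_neg hx', ih]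
    · rw [List.find?_cons_of_pos hx, List.filter_cons_of_pos hx, List.head?_cons]

-- KEY: the first pair (in combinations order) whose components both satisfy P is the
-- pair of the first two elements of the filtered list
theorem find?_combinations_eq_filter (P : String → Bool) : ∀ (xs : List String),
    (pvCombinations2 xs).find? (fun pr => P pr.1 && P pr.2)
      = match xs.filter P with
        | p1 :: p2 :: _ => some (p1, p2)
        | _ => none := by
  intro xs
  induction xs with
  | nil => simp [pvCombinations2]
  | cons x xs ih =>
    simp only [pvCombinations2, List.find?_append, find?_map_pair, List.filter_cons]
    by_cases hx : P x
    · simp only [hx, if_pos, find?_eq_head?_filter']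
      cases hfilter : xs.filter P with
      | cons y ys => simp
      | nil =>
        have hnone : (pvCombinations2 xs).find? (fun pr => P pr.1 && P pr.2) = none := by
          rw [List.find?_eq_none]
          intro pr hpr
          have h2 : pr.2 ∈ xs := pvCombinations2_snd_mem hpr
          have hP2 : ¬ P pr.2 = true := by
            intro hP
            have : pr.2 ∈ xs.filter P := List.mem_filter.mpr ⟨h2, hP⟩
            simp [hfilter] at this
          simp [hP2]
        simp [hnone]
    · simp [hx, ih]

-- the per-phrase loop of A as a filterMap (inner fold, generalized accumulator)
theorem pvL1 {β : Type} (g : String → Option (String × String)) (k : String → String → String → β) :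
    ∀ (zs : List String) (acc : List β),
    zs.foldl (fun acc z => match g z with | some (p1, p2) => acc ++ [k z p1 p2] | none => acc) acc
      = acc ++ zs.filterMap (fun z => (g z).map (fun pr => k z pr.1 pr.2)) := by
  intro zs
  induction zs with
  | nil => simp
  | cons z zs ih =>
    intro acc
    cases hg : g z with
    | none => simp [List.foldl_cons, hg, ih]
    | some pr => cases pr; simp [List.foldl_cons, hg, ih]

theorem pvL2 {β : Type} (g : String → String → Option (String × String)) (k : String → String → String → String → β) (zs : List String) :
    ∀ (ys : List String) (acc : List β),
    ys.foldl (fun acc y => zs.foldl (fun acc z => match g y z with | some (p1, p2) => acc ++ [k y z p1 p2] | none => acc) acc) acc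
      = acc ++ ys.flatMap (fun y => zs.filterMap (fun z => (g y z).map (fun pr => k y z pr.1 pr.2))) := by
  intro ys
  induction ys with
  | nil => simp
  | cons y ys ih =>
    intro acc
    rw [List.foldl_cons, pvL1 (g y) (k y), ih]
    simp [List.flatMap_cons]

theorem pvL3 {β : Type} (g : String → String → String → Option (String × String)) (k : String → String → String → String → String → β) (ys zs : List String) :
    ∀ (xs : List String) (acc : List β),
    xs.foldl (fun acc x => ys.foldl (fun acc y => zs.foldl (fun acc z => match g x y z with | some (p1, p2) => acc ++ [k x y z p1 p2] | none => acc) acc) acc) acc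
      = acc ++ xs.flatMap (fun x => ys.flatMap (fun y => zs.filterMap (fun z => (g x y z).map (fun pr => k x y z pr.1 pr.2)))) := by
  intro xs
  induction xs with
  | nil => simp
  | cons x xs ih =>
    intro acc
    rw [List.foldl_cons, pvL2 (g x) (k x), ih]
    simp [List.flatMap_cons]

-- per phrase: first matching pair, tagged with the phrase, equals B's first-two-of-filter
theorem pvPerPhrase (P : String → Bool) (ks : List String) (ph : String) :
    (((pvCombinations2 ks).find? (fun pr => P pr.1 && P pr.2)).map
          (fun pr => (ph, pr.1, pr.2)))
      = match (ks.filter P).take 2 with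
        | [p1, p2] => some (ph, p1, p2)
        | _ => none := by
  rw [find?_combinations_eq_filter]
  rcases hf : ks.filter P with _ | ⟨p1, _ | ⟨p2, rest⟩⟩ <;> simp

-- ===== VERDICT (by name: the statement is the Claim_ definition above) =====
theorem process_verb_chunk_spec : Claim_equal_process_verb_chunk := by
  intro verb_chunk colors animals pokemon_letters _
  unfold Spec_process_verb_chunk process_verb_chunk process_verb_chunk_alt
  refine Eq.trans
    (pvL3
      (fun v c a => (pvCombinations2 (PySem.Dict.ofList pokemon_letters).keys).find? (fun pr =>
        check_letter_overlap_preprocessed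
          (PySem.Set.ofList ((PySem.Str.join " " [v, c, a]).toList.map (fun ch => String.singleton ch)))
          ((PySem.Dict.ofList pokemon_letters).getD pr.1 [])
          ((PySem.Dict.ofList pokemon_letters).getD pr.2 [])))
      (fun v c a p1 p2 => (PySem.Str.join " " [v, c, a], p1, p2))
      colors animals verb_chunk []) ?_
  simp only [List.nil_append, List.filterMap_flatMap, List.filterMap_map]
  congr 1
  funext v
  congr 1
  funext c
  congr 1
  funext a
  exact pvPerPhrase
    (fun n => pvOverlap
      (PySem.Set.ofList ((PySem.Str.join " " [v, c, a]).toList.map (fun ch => String.singleton ch)))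
      ((PySem.Dict.ofList pokemon_letters).getD n []))
    (PySem.Dict.ofList pokemon_letters).keys
    (PySem.Str.join " " [v, c, a])
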